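-- pv_equiv track=rewrite | github.com/Groot-Space/BAEKJOON_ONLINE_JUDGE | cordingTest풀이_파이썬/과거 문제풀이/sktest10.py | solution
-- ===== SOURCE A (Python) =====
-- from itertools import permutations
--
-- LENGTH = 3
--
-- def solution(baseball):
--     candidates = get_candidates(LENGTH)
--     answer_count = 0
--     for candidate in candidates:
--         is_passed = check_candidate(baseball, candidate)
--         if is_passed:
--             answer_count += 1
--     return answer_count
--
-- def get_candidates(length): #던질 수 있는 모든 경우의 수
--     numbers = list(range(1, 10))
--     candidates = list(permutations(numbers, length))
--     return candidates
--
-- def check_candidate(baseball, candidate): #결과가 맞아 떨어지는지 확인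
--     is_passed = True
--     for guess in baseball:
--         correct = check(guess, candidate)
--         if not correct:
--             is_passed = False
--             break
--     return is_passed
--
-- def check(guess, candidate):
--     guess_num, guess_strike, guess_ball = guess
--     guess_num_str = str(guess_num)
--     candidate_str = tuple_to_str(candidate)
--     strike = 0
--     ball = 0
--     for str1, str2 in zip(guess_num_str, candidate_str):
--         if str1 == str2:
--             strike += 1
--         elif str1 in candidate_str:
--             ball += 1
--
--     is_correct = True
--     if strike != guess_strike or ball != guess_ball:
--         is_correct = False
--     return is_correct
--
-- def tuple_to_str(tuple_):
--     result = ""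
--     for number in tuple_:
--         result += str(number)
--     return result
-- ===== SOURCE B (Python) =====
-- def solution(baseball):
--     # integer-range enumeration 123..987 with digit-string validity test,
--     # hints preprocessed once; ball derived as membership-hits minus strikes
--     hints = [(str(num), s, s + b) for (num, s, b) in baseball]
--     total = 0
--     for n in range(123, 988):
--         cand = str(n)
--         if '0' in cand or len(set(cand)) < 3:
--             continue
--         if all(hint_ok(g, ws, wh, cand) for (g, ws, wh) in hints):
--             total += 1
--     return total
--
-- def hint_ok(g, ws, wh, cand):
--     pairs = list(zip(g, cand))
--     strikes = sum(a == b for a, b in pairs)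
--     hits = sum(a in cand for a, _ in pairs)
--     return strikes == ws and hits == wh
-- ===== Notes on version B (the rewrite author's own statement) =====
-- stated objective: alternative
-- what changed: Permutation enumeration with a per-candidate strike/ball if/elif counter loop is replaced by an integer scan of 123..987 with a digit-string validity test, hints preprocessed once into (digits, strikes, strikes+balls), and the ball count derived arithmetically as membership hits minus strikes instead of being counted in a branch.
import Mathlib
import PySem

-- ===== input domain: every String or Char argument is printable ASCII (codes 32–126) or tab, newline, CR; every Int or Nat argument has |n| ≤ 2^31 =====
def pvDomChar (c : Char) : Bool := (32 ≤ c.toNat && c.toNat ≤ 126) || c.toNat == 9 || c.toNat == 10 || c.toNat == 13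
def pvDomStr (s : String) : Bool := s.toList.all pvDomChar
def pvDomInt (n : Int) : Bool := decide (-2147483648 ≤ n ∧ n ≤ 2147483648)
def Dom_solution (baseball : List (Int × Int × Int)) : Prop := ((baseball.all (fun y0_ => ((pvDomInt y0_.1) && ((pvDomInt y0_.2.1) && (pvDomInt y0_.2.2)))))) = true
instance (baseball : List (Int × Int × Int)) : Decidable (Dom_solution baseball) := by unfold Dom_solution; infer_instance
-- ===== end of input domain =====

-- B replaces A's permutation enumeration + per-candidate strike/ball counter loop by an
-- integer-range scan 123..987 with a digit-validity test and ball = membership-hits − strikes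
-- scoring against preprocessed hints (alternative decomposition, same cost).

-- ===== PORT A =====
-- get_candidates(3): itertools.permutations(range(1, 10), 3)
def getCandidates : List (List Int) :=
  PySem.List.permutations (PySem.List.pyRange 1 10 1) 3

-- tuple_to_str: loop 'result += str(number)'
def tupleToStr (t : List Int) : List Char :=
  t.foldl (fun result number => result ++ PySem.Int.toChars number) []

-- check(guess, candidate): one loop over zip keeping (strike, ball) counters
def check (guess : Int × Int × Int) (candidate : List Int) : Bool :=
  let guessNumStr := PySem.Int.toChars guess.1
  let candidateStr := tupleToStr candidate
  let sb : Int × Int :=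
    (guessNumStr.zip candidateStr).foldl
      (fun sb p =>
        if p.1 = p.2 then (sb.1 + 1, sb.2)
        else if PySem.Chars.isIn [p.1] candidateStr then (sb.1, sb.2 + 1)
        else sb) (0, 0)
  if sb.1 ≠ guess.2.1 ∨ sb.2 ≠ guess.2.2 then false else true

-- check_candidate: loop over hints with early break
def checkCandidate (baseball : List (Int × Int × Int)) (candidate : List Int) : Bool :=
  match baseball with
  | [] => true
  | guess :: rest => if check guess candidate then checkCandidate rest candidate else false

def solution (baseball : List (Int × Int × Int)) : Int :=
  getCandidates.foldl (fun answerCount candidate =>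
    if checkCandidate baseball candidate then answerCount + 1 else answerCount) 0

-- ===== PORT B =====
-- hint_ok(g, ws, wh, cand): sums of booleans over the zipped pairs (sum of bools = count of True)
def hintOk (g : List Char) (ws wh : Int) (cand : List Char) : Bool :=
  let pairs := g.zip cand
  let strikes : Int := pairs.countP (fun p => p.1 = p.2)
  let hits : Int := pairs.countP (fun p => PySem.Chars.isIn [p.1] cand)
  strikes = ws ∧ hits = wh

def solution_alt (baseball : List (Int × Int × Int)) : Int :=
  let hints := baseball.map (fun g => (PySem.Int.toChars g.1, g.2.1, g.2.1 + g.2.2))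
  (PySem.List.pyRange 123 988 1).foldl (fun total n =>
    let cand := PySem.Int.toChars n
    if PySem.Chars.isIn ['0'] cand ∨ (PySem.Set.ofList cand).length < 3 then total
    else if hints.all (fun h => hintOk h.1 h.2.1 h.2.2 cand) then total + 1
    else total) 0

-- ===== PRECONDITION & SPEC =====
def Spec_solution (baseball : List (Int × Int × Int)) (out : Int) : Prop := out = solution_alt baseball
instance (baseball : List (Int × Int × Int)) (out : Int) : Decidable (Spec_solution baseball out) := by unfold Spec_solution; infer_instance

-- ===== CLAIM (what is proved, stated in full; the proofs are below) =====
def Claim_equal_solution : Prop := ∀ (baseball : List (Int × Int × Int)), Dom_solution baseball → Spec_solution baseball (solution baseball)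

-- ===== LEMMAS AND PROOFS =====

-- valid strings of B's range scan are exactly A's candidate strings, in the same order
set_option maxRecDepth 100000 in
theorem range_strings_eq :
    ((PySem.List.pyRange 123 988 1).filter (fun n =>
        !(PySem.Chars.isIn ['0'] (PySem.Int.toChars n) ||
          decide ((PySem.Set.ofList (PySem.Int.toChars n)).length < 3)))).map PySem.Int.toChars
      = getCandidates.map tupleToStr := by decide

-- A's strike/ball fold as two counts
theorem fold_sb (cstr : List Char) (l : List (Char × Char)) (s b : Int) :
    l.foldl (fun sb p =>
        if p.1 = p.2 then (sb.1 + 1, sb.2)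
        else if PySem.Chars.isIn [p.1] cstr then (sb.1, sb.2 + 1)
        else sb) (s, b)
      = (s + (l.countP (fun p => p.1 = p.2) : Int),
         b + (l.countP (fun p => !decide (p.1 = p.2) && PySem.Chars.isIn [p.1] cstr) : Int)) := by
  induction l generalizing s b with
  | nil => simp
  | cons p rest ih =>
    by_cases h : p.1 = p.2
    · simp [h, ih]; omega
    · by_cases h2 : PySem.Chars.isIn [p.1] cstr
      · simp [h, h2, ih]; omega
      · simp [h, h2, ih]

-- membership hits split into strikes plus balls (strikes are automatically hits)
theorem countP_hits_split (cand : List Char) (pairs : List (Char × Char))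
    (hmem : ∀ p ∈ pairs, p.2 ∈ cand) :
    pairs.countP (fun p => PySem.Chars.isIn [p.1] cand)
      = pairs.countP (fun p => p.1 = p.2)
        + pairs.countP (fun p => !decide (p.1 = p.2) && PySem.Chars.isIn [p.1] cand) := by
  induction pairs with
  | nil => rfl
  | cons p rest ih =>
    have hrest := ih (fun q hq => hmem q (List.mem_cons_of_mem _ hq))
    by_cases h : p.1 = p.2
    · have hin : PySem.Chars.isIn [p.2] cand = true := by
        rw [PySem.Chars.isIn_iff_infix]
        obtain ⟨s, t, rfl⟩ := List.append_of_mem (hmem p List.mem_cons_self)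
        exact ⟨s, t, by simp⟩
      simp [h, hin, hrest]; omega
    · by_cases h2 : PySem.Chars.isIn [p.1] cand
      · simp [h, h2, hrest]; omega
      · simp [h, h2, hrest]

-- A's per-hint check equals B's per-hint test on the candidate's string
theorem check_eq_hintOk (guess : Int × Int × Int) (candidate : List Int) :
    check guess candidate
      = hintOk (PySem.Int.toChars guess.1) guess.2.1 (guess.2.1 + guess.2.2) (tupleToStr candidate) := by
  have hmem : ∀ p ∈ (PySem.Int.toChars guess.1).zip (tupleToStr candidate),
      p.2 ∈ tupleToStr candidate := fun p hp => (List.of_mem_zip hp).2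
  simp only [check, hintOk, fold_sb, zero_add,
    countP_hits_split (tupleToStr candidate) _ hmem]
  split_ifs with h
  · rcases h with h | h <;> simp_all
  · rw [not_or, not_not, not_not] at h
    simp [h.1, h.2]

-- A's early-break hint loop is an 'all'
theorem checkCandidate_eq_all (baseball : List (Int × Int × Int)) (candidate : List Int) :
    checkCandidate baseball candidate
      = baseball.all (fun g =>
          hintOk (PySem.Int.toChars g.1) g.2.1 (g.2.1 + g.2.2) (tupleToStr candidate)) := by
  induction baseball with
  | nil => rfl
  | cons g rest ih =>
    simp only [checkCandidate, check_eq_hintOk, List.all_cons, ih]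
    by_cases h : hintOk (PySem.Int.toChars g.1) g.2.1 (g.2.1 + g.2.2) (tupleToStr candidate) <;> simp [h]

-- B's loop body as one boolean guard
theorem hstep_alt (baseball : List (Int × Int × Int)) :
    (fun (total : Int) (n : Int) =>
      let cand := PySem.Int.toChars n
      if PySem.Chars.isIn ['0'] cand ∨ (PySem.Set.ofList cand).length < 3 then total
      else if (baseball.map (fun g => (PySem.Int.toChars g.1, g.2.1, g.2.1 + g.2.2))).all
          (fun h => hintOk h.1 h.2.1 h.2.2 cand) then total + 1
      else total)
    = (fun (total : Int) (n : Int) =>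
      if (!(PySem.Chars.isIn ['0'] (PySem.Int.toChars n) ||
          decide ((PySem.Set.ofList (PySem.Int.toChars n)).length < 3))) &&
        (baseball.map (fun g => (PySem.Int.toChars g.1, g.2.1, g.2.1 + g.2.2))).all
          (fun h => hintOk h.1 h.2.1 h.2.2 (PySem.Int.toChars n)) then total + 1
      else total) := by
  funext total n
  by_cases h1 : PySem.Chars.isIn ['0'] (PySem.Int.toChars n) ∨ (PySem.Set.ofList (PySem.Int.toChars n)).length < 3
  · simp only [h1, if_true]
    rcases h1 with h1 | h1 <;> simp [h1]
  · rw [if_neg h1]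
    rw [not_or] at h1
    have e1 : PySem.Chars.isIn ['0'] (PySem.Int.toChars n) = false := eq_false_of_ne_true h1.1
    have e2 : decide ((PySem.Set.ofList (PySem.Int.toChars n)).length < 3) = false :=
      decide_eq_false h1.2
    rw [e1, e2]
    rfl

-- B as a count over its valid range strings
theorem alt_count (baseball : List (Int × Int × Int)) :
    solution_alt baseball
      = ((((PySem.List.pyRange 123 988 1).filter (fun n =>
            !(PySem.Chars.isIn ['0'] (PySem.Int.toChars n) ||
              decide ((PySem.Set.ofList (PySem.Int.toChars n)).length < 3)))).map PySem.Int.toChars).countP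
          (fun cand => (baseball.map (fun g => (PySem.Int.toChars g.1, g.2.1, g.2.1 + g.2.2))).all
            (fun h => hintOk h.1 h.2.1 h.2.2 cand)) : Int) := by
  show (PySem.List.pyRange 123 988 1).foldl (fun (total : Int) (n : Int) =>
      let cand := PySem.Int.toChars n
      if PySem.Chars.isIn ['0'] cand ∨ (PySem.Set.ofList cand).length < 3 then total
      else if (baseball.map (fun g => (PySem.Int.toChars g.1, g.2.1, g.2.1 + g.2.2))).all
          (fun h => hintOk h.1 h.2.1 h.2.2 cand) then total + 1
      else total) 0 = _
  rw [hstep_alt, PySem.List.foldl_count_if, List.countP_map, List.countP_filter]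
  rw [show ((fun cand => (baseball.map (fun g => (PySem.Int.toChars g.1, g.2.1, g.2.1 + g.2.2))).all
          (fun h => hintOk h.1 h.2.1 h.2.2 cand)) ∘ PySem.Int.toChars)
      = (fun n => (baseball.map (fun g => (PySem.Int.toChars g.1, g.2.1, g.2.1 + g.2.2))).all
          (fun h => hintOk h.1 h.2.1 h.2.2 (PySem.Int.toChars n))) from rfl]
  rw [show (fun n => (baseball.map (fun g => (PySem.Int.toChars g.1, g.2.1, g.2.1 + g.2.2))).all
          (fun h => hintOk h.1 h.2.1 h.2.2 (PySem.Int.toChars n)) &&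
        !(PySem.Chars.isIn ['0'] (PySem.Int.toChars n) ||
          decide ((PySem.Set.ofList (PySem.Int.toChars n)).length < 3)))
      = (fun n => (!(PySem.Chars.isIn ['0'] (PySem.Int.toChars n) ||
          decide ((PySem.Set.ofList (PySem.Int.toChars n)).length < 3))) &&
        (baseball.map (fun g => (PySem.Int.toChars g.1, g.2.1, g.2.1 + g.2.2))).all
          (fun h => hintOk h.1 h.2.1 h.2.2 (PySem.Int.toChars n)))
      from funext fun n => Bool.and_comm _ _]
  omega

-- ===== VERDICT (by name: the statement is the Claim_ definition above) =====
theorem solution_spec : Claim_equal_solution := by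
  intro baseball _
  unfold Spec_solution
  rw [alt_count, range_strings_eq, List.countP_map]
  unfold solution
  rw [PySem.List.foldl_count_if]
  have hpt : ∀ c ∈ getCandidates, (checkCandidate baseball c = true ↔
      ((fun cand => (baseball.map (fun g => (PySem.Int.toChars g.1, g.2.1, g.2.1 + g.2.2))).all
          (fun h => hintOk h.1 h.2.1 h.2.2 cand)) ∘ tupleToStr) c = true) := by
    intro c _
    simp [checkCandidate_eq_all, List.all_map, Function.comp_def]
  rw [List.countP_congr hpt]
  omega
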